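-- pv_equiv track=rewrite | github.com/B00m3r0302/bookbot | stats.py | words_dictionary
-- ===== SOURCE A (Python) =====
-- def words_dictionary(content):
--     dictionary = {}
--
--     # Get character count
--     for character in content:
--         lower_case = character.lower()
--         if lower_case == "\ufeff":
--             continue
--         elif lower_case not in dictionary:
--             dictionary[lower_case] = 1
--         else:
--             dictionary[lower_case] += 1
--
--     return dictionary
-- ===== SOURCE B (Python) =====
-- def words_dictionary(content):
--     lowered = [c.lower() for c in content if c.lower() != "\ufeff"]
--     return {ch: lowered.count(ch) for ch in dict.fromkeys(lowered)}
-- ===== Notes on version B (the rewrite author's own statement) =====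
-- stated objective: alternative
-- what changed: A builds the counts in one accumulating dict pass; B first materialises the filtered lowercased character list, then takes its ordered distinct characters (dict.fromkeys) and counts each with list.count, an index-then-count shape.
import Mathlib
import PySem

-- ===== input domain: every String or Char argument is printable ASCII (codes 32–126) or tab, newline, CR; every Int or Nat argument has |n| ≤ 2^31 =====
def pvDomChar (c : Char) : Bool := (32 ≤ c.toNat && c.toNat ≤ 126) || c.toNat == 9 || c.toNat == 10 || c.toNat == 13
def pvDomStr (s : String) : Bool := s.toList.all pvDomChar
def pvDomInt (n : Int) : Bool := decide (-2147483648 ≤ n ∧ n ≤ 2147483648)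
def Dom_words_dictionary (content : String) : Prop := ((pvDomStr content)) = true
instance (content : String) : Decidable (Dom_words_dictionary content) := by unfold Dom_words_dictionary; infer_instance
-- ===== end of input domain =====

-- B replaces A's single accumulating dict pass by building the filtered lowercased list first,
-- then mapping each ordered-distinct character to its count (alternative decomposition, same behaviour).


-- ===== PORT A =====
-- character.lower() on a single character: lowercase it and view it as a one-character string (the dict key)
def pvLower1 (c : Char) : String := String.ofList (PySem.Chars.lower [c])

def words_dictionary (content : String) : List (String × Int) :=
  (content.toList.foldl (fun dictionary character =>
      let lower_case := pvLower1 character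
      if lower_case = "\ufeff" then dictionary
      else if dictionary.contains lower_case = false then dictionary.insert lower_case 1
      else dictionary.modify lower_case 0 (· + 1))
    PySem.Dict.empty).items

-- ===== PORT B =====
def words_dictionary_alt (content : String) : List (String × Int) :=
  let lowered := content.toList.filterMap (fun c =>
      if pvLower1 c = "\ufeff" then none else some (pvLower1 c))
  (PySem.List.dedup lowered).map (fun ch => (ch, (PySem.List.count lowered ch : Int)))

-- ===== PRECONDITION & SPEC =====
def Spec_words_dictionary (content : String) (out : List (String × Int)) : Prop := out = words_dictionary_alt content
instance (content : String) (out : List (String × Int)) : Decidable (Spec_words_dictionary content out) := by unfold Spec_words_dictionary; infer_instance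

-- ===== CLAIM (what is proved, stated in full; the proofs are below) =====
def Claim_equal_words_dictionary : Prop := ∀ (content : String), Dom_words_dictionary content → Spec_words_dictionary content (words_dictionary content)

-- ===== LEMMAS AND PROOFS =====

-- A's insert-or-increment branch is exactly Counter's modify step
theorem pv_step_eq (d : PySem.Dict String Int) (k : String) :
    (if d.contains k = false then d.insert k 1 else d.modify k 0 (· + 1)) = d.modify k 0 (· + 1) := by
  by_cases h : d.contains k = false
  · simp only [h, if_pos, PySem.Dict.modify, PySem.Dict.getD_of_not_contains d 0 h]
    norm_num
  · simp [h]

-- a skip-or-count fold over the raw characters is the Counter fold over the filterMap'd keys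
theorem pv_foldl_filterMap (l : List Char) (d : PySem.Dict String Int) :
    l.foldl (fun d c => if pvLower1 c = "\ufeff" then d else d.modify (pvLower1 c) 0 (· + 1)) d
    = (l.filterMap (fun c => if pvLower1 c = "\ufeff" then none else some (pvLower1 c))).foldl
        (fun d k => d.modify k 0 (· + 1)) d := by
  induction l generalizing d with
  | nil => rfl
  | cons c t ih =>
    by_cases h : pvLower1 c = "\ufeff" <;> simp [h, ih]

-- ===== VERDICT (by name: the statement is the Claim_ definition above) =====
theorem words_dictionary_spec : Claim_equal_words_dictionary := by
  intro content _
  show words_dictionary content = words_dictionary_alt content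
  unfold words_dictionary words_dictionary_alt
  rw [PySem.List.foldl_congr_mem content.toList _
        (fun d c => if pvLower1 c = "\ufeff" then d else d.modify (pvLower1 c) 0 (· + 1))
        PySem.Dict.empty
        (by intro acc x _
            by_cases h : pvLower1 x = "\ufeff" <;> simp [h, pv_step_eq]),
      pv_foldl_filterMap, ← PySem.Dict.counter_eq_foldl, PySem.Dict.items_counter]
  simp [PySem.List.dedup_eq_ofList, PySem.List.count_eq]
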